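-- pv_equiv track=rewrite | github.com/MichalSzewczyk/python-learning | labs/lab_22.py | dna_to_aminos
-- ===== SOURCE A (Python) =====
-- def dna_to_aminos(sequence):
--     """Zwraca listę trójek liter z sekwencji, dopuszczając jedynie trójki złożone z liter A, C, G oraz  U"""
--     result = []
--     current = ''
--     for nucleodite in sequence:
--         if len(current) < 3:
--             if nucleodite not in ['A', 'C', 'G', 'U']:
--                 nucleodite = 'X'  # marker niepoprawnej sekwencji
--             current += nucleodite
--             if len(current) == 3:
--                 if 'X' not in current:
--                     result.append(current)
--                 current = ''
--     return result
-- ===== SOURCE B (Python) =====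
-- def dna_to_aminos(sequence):
--     """Zwraca listę trójek liter z sekwencji, dopuszczając jedynie trójki złożone z liter A, C, G oraz  U"""
--     return [''.join(triple)
--             for triple in zip(*[iter(sequence)] * 3)
--             if all(n in {'A', 'C', 'G', 'U'} for n in triple)]
-- ===== Notes on version B (the rewrite author's own statement) =====
-- stated objective: idiomatic
-- what changed: Replaced the char-by-char accumulator with its invalid-character sentinel marker by the standard zip-grouper comprehension: chunk into triples, keep a triple iff all its characters are valid nucleotides.
import Mathlib
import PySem

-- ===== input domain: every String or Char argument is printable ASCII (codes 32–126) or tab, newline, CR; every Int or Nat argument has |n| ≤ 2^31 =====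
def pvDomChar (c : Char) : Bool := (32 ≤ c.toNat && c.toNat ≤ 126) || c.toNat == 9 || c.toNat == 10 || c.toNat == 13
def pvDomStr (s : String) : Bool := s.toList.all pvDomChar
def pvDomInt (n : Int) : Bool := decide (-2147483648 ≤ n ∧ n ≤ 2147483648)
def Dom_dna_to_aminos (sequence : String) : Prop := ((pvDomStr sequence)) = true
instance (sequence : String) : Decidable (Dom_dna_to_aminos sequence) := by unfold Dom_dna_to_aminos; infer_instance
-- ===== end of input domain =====

-- B replaces A's char-by-char accumulator with an invalid-character sentinel by a chunk-into-triples-then-validate comprehension (idiomatic; same cost).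

-- ===== PORT A =====
-- A's loop state: accumulated `result` and the current partial triple `cur` (as List Char).
def dnaLoop : List Char → List String → List Char → List String
  | [], res, _ => res
  | n :: rest, res, cur =>
    if cur.length < 3 then
      let n' := if n ∈ ['A', 'C', 'G', 'U'] then n else 'X'
      let cur' := cur ++ [n']
      if cur'.length = 3 then
        dnaLoop rest (if 'X' ∈ cur' then res else res ++ [String.mk cur']) []
      else
        dnaLoop rest res cur'
    else
      dnaLoop rest res cur

def dna_to_aminos (sequence : String) : List String :=
  dnaLoop sequence.toList [] []

-- ===== PORT B =====
-- chunk into consecutive triples (dropping the partial tail, as zip does), keep the all-valid ones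
def dnaChunks : List Char → List String
  | a :: b :: c :: rest =>
    (if [a, b, c].all (fun n => n ∈ ['A', 'C', 'G', 'U']) then [String.mk [a, b, c]] else [])
      ++ dnaChunks rest
  | _ => []

def dna_to_aminos_alt (sequence : String) : List String :=
  dnaChunks sequence.toList

-- ===== PRECONDITION & SPEC =====
def Spec_dna_to_aminos (sequence : String) (out : List String) : Prop := out = dna_to_aminos_alt sequence
instance (sequence : String) (out : List String) : Decidable (Spec_dna_to_aminos sequence out) := by unfold Spec_dna_to_aminos; infer_instance

-- ===== CLAIM (what is proved, stated in full; the proofs are below) =====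
def Claim_equal_dna_to_aminos : Prop := ∀ (sequence : String), Dom_dna_to_aminos sequence → Spec_dna_to_aminos sequence (dna_to_aminos sequence)

-- ===== LEMMAS AND PROOFS =====

theorem dnaLoop_eq_chunks : ∀ (l : List Char) (res : List String),
    dnaLoop l res [] = res ++ dnaChunks l := by
  intro l
  induction l using dnaChunks.induct with
  | case1 a b c rest ih =>
    intro res
    by_cases ha : a ∈ ['A', 'C', 'G', 'U'] <;>
    by_cases hb : b ∈ ['A', 'C', 'G', 'U'] <;>
    by_cases hc : c ∈ ['A', 'C', 'G', 'U']
    · have hax : ('X' : Char) ≠ a := by simp only [List.mem_cons, List.not_mem_nil, or_false] at ha; rcases ha with rfl | rfl | rfl | rfl <;> decide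
      have hbx : ('X' : Char) ≠ b := by simp only [List.mem_cons, List.not_mem_nil, or_false] at hb; rcases hb with rfl | rfl | rfl | rfl <;> decide
      have hcx : ('X' : Char) ≠ c := by simp only [List.mem_cons, List.not_mem_nil, or_false] at hc; rcases hc with rfl | rfl | rfl | rfl <;> decide
      simp_all [dnaLoop, dnaChunks, ih, List.mem_cons]
    all_goals simp_all [dnaLoop, dnaChunks, ih, List.mem_cons]
  | case2 l h =>
    intro res
    rcases l with _ | ⟨a, _ | ⟨b, _ | ⟨c, rest⟩⟩⟩
    · simp [dnaLoop, dnaChunks]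
    · simp [dnaLoop, dnaChunks]
    · simp [dnaLoop, dnaChunks]
    · exact absurd rfl (h a b c rest)

-- ===== VERDICT (by name: the statement is the Claim_ definition above) =====
theorem dna_to_aminos_spec : Claim_equal_dna_to_aminos := by
  intro s _
  unfold Spec_dna_to_aminos dna_to_aminos dna_to_aminos_alt
  simpa using dnaLoop_eq_chunks s.toList []
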